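-- pv_equiv track=rewrite | github.com/therealarvin/pdf-field-extractor | reconsolidate_schema.py | _are_semantically_related
-- ===== SOURCE A (Python) =====
-- from typing import List, Dict, Tuple, Optional
--
-- def _are_semantically_related(names: List[str]) -> bool:
--     """Check if checkbox names are semantically related"""
--     # Simple heuristic: check for common words
--     if len(names) < 2:
--         return False
--
--     # Extract words from each name
--     word_sets = []
--     for name in names:
--         words = set(name.lower().split())
--         # Remove common words
--         words -= {'the', 'a', 'an', 'is', 'are', 'of', 'for', 'to', 'in', 'on', 'with'}
--         word_sets.append(words)
--
--     # Check for common words across all names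
--     if word_sets:
--         common_words = word_sets[0]
--         for word_set in word_sets[1:]:
--             common_words &= word_set
--
--         # If there's at least one meaningful common word
--         return len(common_words) > 0
--
--     return False
-- ===== SOURCE B (Python) =====
-- from typing import List
--
-- def _are_semantically_related(names: List[str]) -> bool:
--     """Check if checkbox names are semantically related"""
--     if len(names) < 2:
--         return False
--     stop = {'the', 'a', 'an', 'is', 'are', 'of', 'for', 'to', 'in', 'on', 'with'}
--     freq = {}
--     for name in names:
--         for word in set(name.lower().split()) - stop:
--             freq[word] = freq.get(word, 0) + 1
--     return any(count == len(names) for count in freq.values())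
-- ===== Notes on version B (the rewrite author's own statement) =====
-- stated objective: idiomatic
-- what changed: Replaces the build-all-word-sets-then-fold-intersection pipeline with a single pass that increments a frequency table once per distinct meaningful word per name and then checks whether any count equals len(names).
import Mathlib
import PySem

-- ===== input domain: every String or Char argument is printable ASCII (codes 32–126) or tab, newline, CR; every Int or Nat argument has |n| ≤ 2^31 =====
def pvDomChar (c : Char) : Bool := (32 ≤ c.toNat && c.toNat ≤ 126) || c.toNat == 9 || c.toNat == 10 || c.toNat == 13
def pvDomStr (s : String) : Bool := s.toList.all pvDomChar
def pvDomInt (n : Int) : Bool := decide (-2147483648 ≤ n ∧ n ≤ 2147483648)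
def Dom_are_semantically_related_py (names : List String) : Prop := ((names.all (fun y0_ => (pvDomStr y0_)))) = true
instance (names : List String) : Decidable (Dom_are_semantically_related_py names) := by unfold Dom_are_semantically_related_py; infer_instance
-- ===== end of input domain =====

-- B replaces the intersection fold with a one-pass word-frequency table checked against len(names); same result, no speed claim.

-- shared helper: set(name.lower().split()) - {stop words}
def pvStopWords : List String :=
  ["the", "a", "an", "is", "are", "of", "for", "to", "in", "on", "with"]

def pvWordsOf (name : String) : PySem.Set String :=
  PySem.Set.diff (PySem.Set.ofList (PySem.Str.split₀ (PySem.Str.lower name))) pvStopWords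

-- ===== PORT A =====
def are_semantically_related_py (names : List String) : Bool :=
  if names.length < 2 then false
  else
    let wordSets : List (PySem.Set String) :=
      names.foldl (fun acc name => acc ++ [pvWordsOf name]) []
    match wordSets with
    | [] => false
    | s0 :: rest =>
        let common := rest.foldl PySem.Set.inter s0
        decide (0 < common.length)

-- ===== PORT B =====
def are_semantically_related_py_alt (names : List String) : Bool :=
  if names.length < 2 then false
  else
    let freq : PySem.Dict String Int :=
      names.foldl
        (fun d name => (pvWordsOf name).foldl (fun d w => d.modify w 0 (· + 1)) d)
        PySem.Dict.empty
    freq.values.any (fun c => c == (names.length : Int))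

-- ===== PRECONDITION & SPEC =====
def Spec_are_semantically_related_py (names : List String) (out : Bool) : Prop := out = are_semantically_related_py_alt names
instance (names : List String) (out : Bool) : Decidable (Spec_are_semantically_related_py names out) := by unfold Spec_are_semantically_related_py; infer_instance

-- ===== CLAIM (what is proved, stated in full; the proofs are below) =====
def Claim_equal_are_semantically_related_py : Prop := ∀ (names : List String), Dom_are_semantically_related_py names → Spec_are_semantically_related_py names (are_semantically_related_py names)

-- ===== LEMMAS AND PROOFS =====

theorem pvNodup_wordsOf (name : String) : (pvWordsOf name).Nodup := by
  exact PySem.Set.nodup_diff _ _ (PySem.Set.nodup_ofList _)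

theorem pvMem_foldl_inter (rest : List (PySem.Set String)) (s0 : PySem.Set String)
    (w : String) :
    w ∈ rest.foldl PySem.Set.inter s0 ↔ w ∈ s0 ∧ ∀ s ∈ rest, w ∈ s := by
  induction rest generalizing s0 with
  | nil => simp
  | cons s t ih =>
      simp only [List.foldl_cons, ih, PySem.Set.mem_inter, List.mem_cons]
      constructor
      · rintro ⟨⟨h0, hs⟩, hall⟩
        refine ⟨h0, fun x hx => ?_⟩
        rcases hx with rfl | hx
        · exact hs
        · exact hall x hx
      · rintro ⟨h0, hall⟩
        exact ⟨⟨h0, hall s (Or.inl rfl)⟩, fun x hx => hall x (Or.inr hx)⟩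

theorem pvFoldl_nested (names : List String) (d : PySem.Dict String Int) :
    names.foldl (fun d name => (pvWordsOf name).foldl (fun d w => d.modify w 0 (· + 1)) d) d
      = (names.flatMap pvWordsOf).foldl (fun d w => d.modify w 0 (· + 1)) d := by
  induction names generalizing d with
  | nil => rfl
  | cons h t ih => simp [List.foldl_append, ih]

theorem pvCount_flatMap (names : List String) (w : String) :
    ((names.flatMap pvWordsOf).count w : Nat)
      = (names.map (fun nm => if w ∈ pvWordsOf nm then 1 else 0)).sum := by
  induction names with
  | nil => rfl
  | cons h t ih =>
      simp only [List.flatMap_cons, List.count_append, List.map_cons, List.sum_cons, ih]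
      by_cases hw : w ∈ pvWordsOf h
      · rw [List.count_eq_one_of_mem (pvNodup_wordsOf h) hw, if_pos hw]
      · rw [List.count_eq_zero_of_not_mem hw, if_neg hw]

theorem pvSum_indicator (names : List String) (w : String) :
    (names.map (fun nm => if w ∈ pvWordsOf nm then 1 else 0)).sum = names.length
      ↔ ∀ nm ∈ names, w ∈ pvWordsOf nm := by
  induction names with
  | nil => simp
  | cons h t ih =>
      have hle : (t.map (fun nm => if w ∈ pvWordsOf nm then 1 else 0)).sum ≤ t.length := by
        calc (t.map (fun nm => if w ∈ pvWordsOf nm then 1 else 0)).sum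
            ≤ (t.map (fun _ => 1)).sum := by
              apply List.sum_le_sum; intro i hi; split <;> omega
          _ = t.length := by simp
      simp only [List.map_cons, List.sum_cons, List.length_cons, List.mem_cons,
        forall_eq_or_imp, ← ih]
      by_cases hw : w ∈ pvWordsOf h
      · simp [hw]; omega
      · simp [hw]; omega

theorem pvWords_eq_map (names : List String) :
    names.foldl (fun acc name => acc ++ [pvWordsOf name]) [] = names.map pvWordsOf := by
  have : ∀ acc, names.foldl (fun acc name => acc ++ [pvWordsOf name]) acc
      = acc ++ names.map pvWordsOf := by
    induction names with
    | nil => simp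
    | cons h t ih => intro acc; simp [ih]
  simpa using this []

-- ===== VERDICT (by name: the statement is the Claim_ definition above) =====
theorem are_semantically_related_py_spec : Claim_equal_are_semantically_related_py := by
  intro names _
  unfold Spec_are_semantically_related_py are_semantically_related_py are_semantically_related_py_alt
  by_cases hlen : names.length < 2
  · simp [hlen]
  · simp only [hlen, if_false]
    match names, hlen with
    | h :: t, _ =>
      rw [pvWords_eq_map, pvFoldl_nested]
      simp only [List.map_cons]
      set L := (h :: t).flatMap pvWordsOf with hL
      have hcounter : (L.foldl (fun d w => d.modify w 0 (· + 1)) PySem.Dict.empty)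
          = PySem.Dict.counter L := rfl
      rw [hcounter]
      have hvals : (PySem.Dict.counter L).values
          = (PySem.Set.ofList L).map (fun k => (L.count k : Int)) := by
        have := PySem.Dict.items_counter (xs := L)
        simp only [PySem.Dict.values, this, List.map_map]
        rfl
      rw [hvals]
      rw [Bool.eq_iff_iff]
      simp only [decide_eq_true_eq, List.any_eq_true, List.mem_map, beq_iff_eq]
      rw [List.length_pos_iff_exists_mem]
      constructor
      · rintro ⟨w, hw⟩
        rw [pvMem_foldl_inter] at hw
        obtain ⟨hw0, hwall⟩ := hw
        have hall : ∀ nm ∈ h :: t, w ∈ pvWordsOf nm := by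
          intro nm hnm
          rcases List.mem_cons.mp hnm with rfl | hnm
          · exact hw0
          · exact hwall _ (List.mem_map_of_mem hnm)
        refine ⟨(L.count w : Int), ⟨w, ?_, rfl⟩, ?_⟩
        · exact (PySem.Set.mem_ofList _ _).mpr (List.mem_flatMap.mpr ⟨h, List.mem_cons_self, hw0⟩)
        · have : L.count w = (h :: t).length := by
            rw [pvCount_flatMap, pvSum_indicator]; exact hall
          exact_mod_cast this
      · rintro ⟨c, ⟨w, hwL, rfl⟩, hc⟩
        have hcnt : L.count w = (h :: t).length := by exact_mod_cast hc
        rw [pvCount_flatMap, pvSum_indicator] at hcnt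
        refine ⟨w, (pvMem_foldl_inter _ _ _).mpr ⟨hcnt h List.mem_cons_self, ?_⟩⟩
        intro s hs
        obtain ⟨nm, hnm, rfl⟩ := List.mem_map.mp hs
        exact hcnt nm (List.mem_cons_of_mem _ hnm)
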